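-- pv_equiv track=rewrite | github.com/neuraaak/works-on-my-machine | womm/services/cspell/dictionary_service.py | _add_words_to_config_data
-- ===== SOURCE A (Python) =====
-- def _add_words_to_config_data(
--     config: dict[str, object], words: list[str]
-- ) -> tuple[dict[str, object], int]:
--     """Add words to configuration data (in-memory)."""
--     if "words" not in config:
--         config["words"] = []
--
--     added_count = 0
--     for word in words:
--         if word not in config["words"]:
--             config["words"].append(word)
--             added_count += 1
--
--     return config, added_count
-- ===== SOURCE B (Python) =====
-- def _add_words_to_config_data(
--     config: dict[str, object], words: list[str]
-- ) -> tuple[dict[str, object], int]: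
--     """Add words to configuration data (in-memory)."""
--     cur = config.setdefault("words", [])
--     merged = list(dict.fromkeys(cur + words))
--     additions = merged[len(dict.fromkeys(cur)):]
--     cur.extend(additions)
--     return config, len(additions)
-- ===== Notes on version B (the rewrite author's own statement) =====
-- stated objective: faster
-- what changed: A interleaves a linear membership scan of config['words'] with append/count per word; B never tests membership: it ordered-dedups the concatenation existing+words with dict.fromkeys and slices off everything past the unique existing prefix, then bulk-extends with that slice.
import Mathlib
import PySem

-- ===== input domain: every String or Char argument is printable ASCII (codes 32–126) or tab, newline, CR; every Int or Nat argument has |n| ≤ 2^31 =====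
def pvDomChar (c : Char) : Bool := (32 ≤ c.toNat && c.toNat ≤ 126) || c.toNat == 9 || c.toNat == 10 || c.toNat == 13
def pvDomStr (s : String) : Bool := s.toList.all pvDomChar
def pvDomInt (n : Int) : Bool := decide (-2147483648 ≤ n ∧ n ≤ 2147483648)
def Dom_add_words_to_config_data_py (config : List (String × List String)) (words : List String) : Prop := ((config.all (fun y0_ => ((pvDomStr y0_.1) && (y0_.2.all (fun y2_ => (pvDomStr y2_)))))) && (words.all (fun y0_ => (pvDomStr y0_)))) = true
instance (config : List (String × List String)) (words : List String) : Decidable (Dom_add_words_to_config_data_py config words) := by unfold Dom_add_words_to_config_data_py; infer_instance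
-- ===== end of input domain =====

-- B replaces A's interleaved membership-check/append/count loop by a dedup-and-slice pipeline:
-- ordered-dedup the concatenation existing+words, slice off the part past the unique existing
-- prefix, bulk-extend with that slice. Both Pythons mutate `config` in place identically; the
-- equivalence proved is about the returned (dict, count) pair, the same mutated dict here.

-- ===== PORT A =====
def add_words_to_config_data_py (config : List (String × List String)) (words : List String) : (List (String × List String)) × Int :=
  let d : PySem.Dict String (List String) := PySem.Dict.mk config
  -- if "words" not in config: config["words"] = []
  let d := if d.contains "words" then d else d.insert "words" ([] : List String)
  -- added_count = 0; for word in words: if word not in config["words"]: append; added_count += 1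
  let r := words.foldl
    (fun (s : PySem.Dict String (List String) × Int) word =>
      if (PySem.Dict.getD s.1 "words" []).contains word then s
      else (PySem.Dict.insert s.1 "words" (PySem.Dict.getD s.1 "words" [] ++ [word]), s.2 + 1))
    (d, 0)
  (r.1.items, r.2)

-- ===== PORT B =====
def add_words_to_config_data_py_alt (config : List (String × List String)) (words : List String) : (List (String × List String)) × Int :=
  let d : PySem.Dict String (List String) := PySem.Dict.mk config
  -- cur = config.setdefault("words", [])
  let d := PySem.Dict.setdefault d "words" ([] : List String)
  let cur := PySem.Dict.getD d "words" []
  -- merged = list(dict.fromkeys(cur + words))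
  let merged := PySem.List.dedup (cur ++ words)
  -- additions = merged[k:] with k = len(dict.fromkeys(cur)); 0 ≤ k ≤ len(merged), so drop is exact
  let additions := merged.drop (PySem.List.dedup cur).length
  -- cur.extend(additions)
  let d := PySem.Dict.insert d "words" (cur ++ additions)
  (d.items, (additions.length : Int))

-- ===== PRECONDITION & SPEC =====
-- Pre_ excludes assoc lists whose keys repeat: a Python dict cannot hold a duplicate key, so such
-- encodings have no dict counterpart and the ports' behaviour on them corresponds to no Python run.
def Pre_add_words_to_config_data_py (config : List (String × List String)) (words : List String) : Prop :=
  (config.map Prod.fst).Nodup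
instance (config : List (String × List String)) (words : List String) : Decidable (Pre_add_words_to_config_data_py config words) := by unfold Pre_add_words_to_config_data_py; infer_instance
def pvWitness_add_words_to_config_data_py : (List (String × List String)) × List String :=
  ([("words", ["a"]), ("flags", [])], ["b", "a", "b", "c"])

def Spec_add_words_to_config_data_py (config : List (String × List String)) (words : List String) (out : (List (String × List String)) × Int) : Prop := out = add_words_to_config_data_py_alt config words
instance (config : List (String × List String)) (words : List String) (out : (List (String × List String)) × Int) : Decidable (Spec_add_words_to_config_data_py config words out) := by unfold Spec_add_words_to_config_data_py; infer_instance

-- ===== CLAIM (what is proved, stated in full; the proofs are below) =====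
def Claim_equal_add_words_to_config_data_py : Prop := ∀ (config : List (String × List String)) (words : List String), Dom_add_words_to_config_data_py config words → Pre_add_words_to_config_data_py config words → Spec_add_words_to_config_data_py config words (add_words_to_config_data_py config words)

-- ===== LEMMAS AND PROOFS =====

-- the list of words A's loop appends, as a recursion over the input words
def pvAdds (cur : List String) : List String → List String
  | [] => []
  | w :: ws => if cur.contains w then pvAdds cur ws else w :: pvAdds (cur ++ [w]) ws

-- re-inserting at a present key overwrites: the first insert is absorbed
theorem pv_insert_insert {d : PySem.Dict String (List String)} {k : String} (v v' : List String)
    (h : d.contains k = true) : (d.insert k v).insert k v' = d.insert k v' := by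
  apply PySem.Dict.ext
  rw [PySem.Dict.items_insert_of_contains _ v' (PySem.Dict.contains_insert_self d k v),
      PySem.Dict.items_insert_of_contains _ v h,
      PySem.Dict.items_insert_of_contains _ v' h, List.map_map]
  apply List.map_congr_left
  intro p hp
  by_cases hpk : p.1 = k <;> simp [hpk]

-- inserting the value a present key already holds is a no-op (keys unique)
theorem pv_insert_getD_self {d : PySem.Dict String (List String)} {k : String} (dflt : List String)
    (hn : d.keys.Nodup) (h : d.contains k = true) : d.insert k (d.getD k dflt) = d := by
  apply PySem.Dict.ext
  rw [PySem.Dict.items_insert_of_contains _ _ h]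
  conv_rhs => rw [← List.map_id d.items]
  apply List.map_congr_left
  intro p hp
  obtain ⟨a, b⟩ := p
  by_cases hpk : a = k
  · subst hpk
    have hb := PySem.Dict.getD_of_mem_items d hp hn dflt
    simp [hb]
  · simp [hpk]

-- A's loop, characterised: it bulk-extends "words" by pvAdds and counts its length
theorem pv_loopA (ws : List String) (d : PySem.Dict String (List String)) (c : Int)
    (hn : d.keys.Nodup) (h : d.contains "words" = true) :
    ws.foldl
      (fun (s : PySem.Dict String (List String) × Int) word =>
        if (PySem.Dict.getD s.1 "words" []).contains word then s
        else (PySem.Dict.insert s.1 "words" (PySem.Dict.getD s.1 "words" [] ++ [word]), s.2 + 1))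
      (d, c)
    = (d.insert "words" (d.getD "words" [] ++ pvAdds (d.getD "words" []) ws),
       c + ((pvAdds (d.getD "words" []) ws).length : Int)) := by
  induction ws generalizing d c with
  | nil => simp [pvAdds, pv_insert_getD_self [] hn h]
  | cons w ws ih =>
    simp only [List.foldl_cons, pvAdds]
    by_cases hw : (d.getD "words" []).contains w
    · rw [if_pos hw, if_pos hw, ih d c hn h]
    · rw [if_neg hw, if_neg hw,
        ih (d.insert "words" (d.getD "words" [] ++ [w])) (c + 1)
          (PySem.Dict.nodup_keys_insert d _ _ hn) (PySem.Dict.contains_insert_self d _ _)]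
      rw [PySem.Dict.getD_insert_self, pv_insert_insert _ _ h]
      simp [List.append_assoc]
      omega

-- building a Set over a list with the same members as `cur` appends exactly pvAdds cur ws
theorem pv_update_eq_append_pvAdds (ws : List String) (s cur : List String)
    (h : ∀ x : String, x ∈ s ↔ x ∈ cur) :
    PySem.Set.update s ws = s ++ pvAdds cur ws := by
  induction ws generalizing s cur with
  | nil => simp [PySem.Set.update_nil, pvAdds]
  | cons w ws ih =>
    rw [PySem.Set.update_cons, pvAdds]
    by_cases hw : cur.contains w
    · have hws : w ∈ s := (h w).mpr (by simpa using hw)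
      rw [if_pos hw, PySem.Set.add_of_mem hws]
      exact ih s cur h
    · have hws : w ∉ s := fun hm => hw (by simpa using (h w).mp hm)
      rw [if_neg hw, PySem.Set.add_of_not_mem hws,
        ih (s ++ [w]) (cur ++ [w]) (by intro x; simp [h x])]
      simp

-- B's dedup-and-slice computes pvAdds: dedup (cur ++ ws) = dedup cur ++ pvAdds cur ws
theorem pv_drop_dedup (cur ws : List String) :
    (PySem.List.dedup (cur ++ ws)).drop (PySem.List.dedup cur).length = pvAdds cur ws := by
  rw [PySem.List.dedup_eq_ofList, PySem.List.dedup_eq_ofList, PySem.Set.ofList_append,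
    pv_update_eq_append_pvAdds ws (PySem.Set.ofList cur) cur
      (fun x => PySem.Set.mem_ofList cur x), List.drop_left]

-- ===== VERDICT (by name: the statement is the Claim_ definition above) =====
theorem add_words_to_config_data_py_spec : Claim_equal_add_words_to_config_data_py := by
  intro config words _ hpre
  unfold Spec_add_words_to_config_data_py
  unfold add_words_to_config_data_py add_words_to_config_data_py_alt
  have hn0 : (PySem.Dict.mk config).keys.Nodup := by
    simpa [PySem.Dict.keys_mk] using hpre
  by_cases hc : (PySem.Dict.mk config).contains "words"
  · simp only [PySem.Dict.setdefault_of_contains _ _ hc, hc, if_true]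
    rw [pv_loopA words _ 0 hn0 hc, pv_drop_dedup]
    simp
  · simp only [PySem.Dict.setdefault_of_not_contains _ _ (Bool.eq_false_iff.mpr hc), hc,
      if_false, Bool.false_eq_true]
    rw [pv_loopA words _ 0 (PySem.Dict.nodup_keys_insert _ _ _ hn0)
      (PySem.Dict.contains_insert_self _ _ _)]
    rw [PySem.Dict.getD_insert_self, pv_drop_dedup]
    simp
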